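-- pv_equiv track=rewrite | github.com/skwuwu/Analemma-Os | analemma-workflow-os/backend/src/handlers/utils/node_stats_collector.py | _infer_node_type
-- ===== SOURCE A (Python) =====
-- from typing import Dict, Any, Optional
--
-- def _infer_node_type(state_name: str, detail: Dict[str, Any]) -> str:
--     """
--     상태 이름에서 노드 타입 추론
--     """
--     state_name_lower = state_name.lower()
--
--     # LLM 관련 노드
--     if any(kw in state_name_lower for kw in ["llm", "ai", "generate", "reason", "classify", "write", "analyze"]):
--         if "classify" in state_name_lower:
--             return "classification"
--         elif "generate" in state_name_lower or "write" in state_name_lower: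
--             return "generation"
--         elif "reason" in state_name_lower or "analyze" in state_name_lower:
--             return "reasoning"
--         return "llm_default"
--
--     # 데이터 처리 노드
--     if any(kw in state_name_lower for kw in ["extract", "parse"]):
--         return "extraction"
--     if any(kw in state_name_lower for kw in ["transform", "convert"]):
--         return "transformation"
--     if any(kw in state_name_lower for kw in ["validate", "check", "verify"]):
--         return "validation"
--
--     # 외부 연동 노드
--     if any(kw in state_name_lower for kw in ["api", "http", "request", "call"]):
--         return "api_call"
--     if any(kw in state_name_lower for kw in ["db", "dynamo", "database", "query"]):
--         return "database"
--
--     return "default"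
-- ===== SOURCE B (Python) =====
-- # Priority aggregation: instead of an ordered cascade of early returns, collect
-- # ALL matching keywords and select the one with the smallest priority number.
-- _PRIORITY = {
--     "classify": 0,
--     "generate": 1, "write": 1,
--     "reason": 2, "analyze": 2,
--     "llm": 3, "ai": 3,
--     "extract": 4, "parse": 4,
--     "transform": 5, "convert": 5,
--     "validate": 6, "check": 6, "verify": 6,
--     "api": 7, "http": 7, "request": 7, "call": 7,
--     "db": 8, "dynamo": 8, "database": 8, "query": 8,
-- }
-- _RESULT = {
--     0: "classification", 1: "generation", 2: "reasoning", 3: "llm_default",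
--     4: "extraction", 5: "transformation", 6: "validation",
--     7: "api_call", 8: "database",
-- }
--
-- def _infer_node_type(state_name: str, detail) -> str:
--     s = state_name.lower()
--     best = min((p for kw, p in _PRIORITY.items() if kw in s), default=9)
--     return _RESULT.get(best, "default")
-- ===== Notes on version B (the rewrite author's own statement) =====
-- stated objective: alternative
-- what changed: Instead of A's ordered early-return if/elif cascade, B assigns every keyword a numeric priority, aggregates ALL matching keywords with a running minimum over the priorities, and maps the minimum priority to its result (default 9 -> 'default'); the priority numbering encodes A's precedence so the order-independent aggregation returns the same value.
import Mathlib
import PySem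

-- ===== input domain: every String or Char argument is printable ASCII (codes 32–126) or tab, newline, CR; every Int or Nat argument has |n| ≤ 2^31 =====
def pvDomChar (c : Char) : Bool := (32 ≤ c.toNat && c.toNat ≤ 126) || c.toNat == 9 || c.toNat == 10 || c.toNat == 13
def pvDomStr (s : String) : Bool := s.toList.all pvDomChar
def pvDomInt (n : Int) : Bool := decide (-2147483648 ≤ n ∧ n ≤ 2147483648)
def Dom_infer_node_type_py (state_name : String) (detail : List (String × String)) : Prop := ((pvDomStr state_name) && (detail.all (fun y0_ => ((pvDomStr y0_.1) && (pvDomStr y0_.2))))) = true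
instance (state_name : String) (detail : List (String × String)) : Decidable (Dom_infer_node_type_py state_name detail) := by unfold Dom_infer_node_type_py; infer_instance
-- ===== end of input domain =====

-- B replaces A's ordered early-return keyword cascade by priority aggregation: every keyword
-- carries a numeric priority, a running minimum over the priorities of ALL matching keywords
-- is taken, and the minimum priority is mapped to its result (objective: alternative);
-- 'detail' is unused by both.

-- ===== PORT A =====
def infer_node_type_py (state_name : String) (_detail : List (String × String)) : String :=
  let s := PySem.Str.lower state_name
  if ["llm", "ai", "generate", "reason", "classify", "write", "analyze"].any
      (fun kw => PySem.Str.isIn kw s) then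
    if PySem.Str.isIn "classify" s then "classification"
    else if PySem.Str.isIn "generate" s || PySem.Str.isIn "write" s then "generation"
    else if PySem.Str.isIn "reason" s || PySem.Str.isIn "analyze" s then "reasoning"
    else "llm_default"
  else if ["extract", "parse"].any (fun kw => PySem.Str.isIn kw s) then "extraction"
  else if ["transform", "convert"].any (fun kw => PySem.Str.isIn kw s) then "transformation"
  else if ["validate", "check", "verify"].any (fun kw => PySem.Str.isIn kw s) then "validation"
  else if ["api", "http", "request", "call"].any (fun kw => PySem.Str.isIn kw s) then "api_call"
  else if ["db", "dynamo", "database", "query"].any (fun kw => PySem.Str.isIn kw s) then "database"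
  else "default"

-- ===== PORT B =====
def pvPriority : List (String × Int) :=
  [ ("classify", 0),
    ("generate", 1), ("write", 1),
    ("reason", 2), ("analyze", 2),
    ("llm", 3), ("ai", 3),
    ("extract", 4), ("parse", 4),
    ("transform", 5), ("convert", 5),
    ("validate", 6), ("check", 6), ("verify", 6),
    ("api", 7), ("http", 7), ("request", 7), ("call", 7),
    ("db", 8), ("dynamo", 8), ("database", 8), ("query", 8) ]

def pvResult : PySem.Dict Int String :=
  PySem.Dict.ofList
  [ (0, "classification"), (1, "generation"), (2, "reasoning"), (3, "llm_default"),
    (4, "extraction"), (5, "transformation"), (6, "validation"),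
    (7, "api_call"), (8, "database") ]

-- one step of Python's min(…) over the generator: keep the smaller priority if kw matches
def pvStep (s : String) (acc : Int) (kp : String × Int) : Int :=
  if PySem.Str.isIn kp.1 s then min acc kp.2 else acc

def infer_node_type_py_alt (state_name : String) (_detail : List (String × String)) : String :=
  let s := PySem.Str.lower state_name
  let best := pvPriority.foldl (pvStep s) 9   -- min(…, default=9) as a running minimum
  PySem.Dict.getD pvResult best "default"

-- ===== PRECONDITION & SPEC =====
def Spec_infer_node_type_py (state_name : String) (detail : List (String × String)) (out : String) : Prop := out = infer_node_type_py_alt state_name detail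
instance (state_name : String) (detail : List (String × String)) (out : String) : Decidable (Spec_infer_node_type_py state_name detail out) := by unfold Spec_infer_node_type_py; infer_instance

-- ===== CLAIM (what is proved, stated in full; the proofs are below) =====
def Claim_equal_infer_node_type_py : Prop := ∀ (state_name : String) (detail : List (String × String)), Dom_infer_node_type_py state_name detail → Spec_infer_node_type_py state_name detail (infer_node_type_py state_name detail)

-- ===== LEMMAS AND PROOFS =====

-- the running minimum never exceeds its initial value
theorem pv_fold_le_init (s : String) (L : List (String × Int)) (x : Int) :
    L.foldl (pvStep s) x ≤ x := by
  induction L generalizing x with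
  | nil => simp
  | cons kp t ih =>
      refine le_trans (ih (pvStep s x kp)) ?_
      unfold pvStep; split
      · exact min_le_left _ _
      · exact le_refl _

-- the running minimum is ≤ the priority of any matching keyword in the list
theorem pv_fold_le (s : String) (L : List (String × Int)) (x : Int) (kw : String) (p : Int)
    (hmem : (kw, p) ∈ L) (hin : PySem.Str.isIn kw s = true) :
    L.foldl (pvStep s) x ≤ p := by
  induction L generalizing x with
  | nil => cases hmem
  | cons kp t ih =>
      rcases List.mem_cons.mp hmem with h | h
      · subst h
        refine le_trans (pv_fold_le_init s t (pvStep s x (kw, p))) ?_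
        have hstep : pvStep s x (kw, p) = min x p := by
          unfold pvStep; simp only [hin]; simp
        rw [hstep]; exact min_le_right x p
      · exact ih (pvStep s x kp) h

-- a lower bound on every matching priority and on the initial value bounds the result
theorem pv_fold_ge (s : String) (L : List (String × Int)) (x b : Int) (hx : b ≤ x)
    (h : ∀ kp ∈ L, PySem.Str.isIn kp.1 s = true → b ≤ kp.2) :
    b ≤ L.foldl (pvStep s) x := by
  induction L generalizing x with
  | nil => simpa using hx
  | cons kp t ih =>
      refine ih (pvStep s x kp) ?_ ?_
      · unfold pvStep; split
        · exact le_min hx (h kp (List.mem_cons_self ..) (by assumption))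
        · exact hx
      · intro kp' h1 h2; exact h kp' (List.mem_cons_of_mem _ h1) h2

-- ===== VERDICT (by name: the statement is the Claim_ definition above) =====
set_option maxHeartbeats 1000000 in
theorem infer_node_type_py_spec : Claim_equal_infer_node_type_py := by
  intro state_name detail _
  unfold Spec_infer_node_type_py infer_node_type_py infer_node_type_py_alt
  simp only []
  by_cases hc : PySem.Str.isIn "classify" (PySem.Str.lower state_name) = true
  · have hb : pvPriority.foldl (pvStep (PySem.Str.lower state_name)) 9 = 0 :=
      le_antisymm
        (pv_fold_le (PySem.Str.lower state_name) pvPriority 9 "classify" 0 (by simp [pvPriority]) hc)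
      (pv_fold_ge (PySem.Str.lower state_name) pvPriority 9 0 (by norm_num) (by
        intro kp hmem hin
        fin_cases hmem <;> (try simp_all) <;> omega))
    rw [hb]
    have hres : PySem.Dict.getD pvResult (0 : Int) "default" = "classification" := by decide
    rw [hres]
    simp_all [List.any_cons, List.any_nil, PySem.Str.isIn]
  by_cases hg : PySem.Str.isIn "generate" (PySem.Str.lower state_name) = true
  · have hb : pvPriority.foldl (pvStep (PySem.Str.lower state_name)) 9 = 1 :=
      le_antisymm
        (pv_fold_le (PySem.Str.lower state_name) pvPriority 9 "generate" 1 (by simp [pvPriority]) hg)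
      (pv_fold_ge (PySem.Str.lower state_name) pvPriority 9 1 (by norm_num) (by
        intro kp hmem hin
        fin_cases hmem <;> (try simp_all) <;> omega))
    rw [hb]
    have hres : PySem.Dict.getD pvResult (1 : Int) "default" = "generation" := by decide
    rw [hres]
    simp_all [List.any_cons, List.any_nil, PySem.Str.isIn]
  by_cases hw : PySem.Str.isIn "write" (PySem.Str.lower state_name) = true
  · have hb : pvPriority.foldl (pvStep (PySem.Str.lower state_name)) 9 = 1 :=
      le_antisymm
        (pv_fold_le (PySem.Str.lower state_name) pvPriority 9 "write" 1 (by simp [pvPriority]) hw)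
      (pv_fold_ge (PySem.Str.lower state_name) pvPriority 9 1 (by norm_num) (by
        intro kp hmem hin
        fin_cases hmem <;> (try simp_all) <;> omega))
    rw [hb]
    have hres : PySem.Dict.getD pvResult (1 : Int) "default" = "generation" := by decide
    rw [hres]
    simp_all [List.any_cons, List.any_nil, PySem.Str.isIn]
  by_cases hr : PySem.Str.isIn "reason" (PySem.Str.lower state_name) = true
  · have hb : pvPriority.foldl (pvStep (PySem.Str.lower state_name)) 9 = 2 :=
      le_antisymm
        (pv_fold_le (PySem.Str.lower state_name) pvPriority 9 "reason" 2 (by simp [pvPriority]) hr)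
      (pv_fold_ge (PySem.Str.lower state_name) pvPriority 9 2 (by norm_num) (by
        intro kp hmem hin
        fin_cases hmem <;> (try simp_all) <;> omega))
    rw [hb]
    have hres : PySem.Dict.getD pvResult (2 : Int) "default" = "reasoning" := by decide
    rw [hres]
    simp_all [List.any_cons, List.any_nil, PySem.Str.isIn]
  by_cases hz : PySem.Str.isIn "analyze" (PySem.Str.lower state_name) = true
  · have hb : pvPriority.foldl (pvStep (PySem.Str.lower state_name)) 9 = 2 :=
      le_antisymm
        (pv_fold_le (PySem.Str.lower state_name) pvPriority 9 "analyze" 2 (by simp [pvPriority]) hz)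
      (pv_fold_ge (PySem.Str.lower state_name) pvPriority 9 2 (by norm_num) (by
        intro kp hmem hin
        fin_cases hmem <;> (try simp_all) <;> omega))
    rw [hb]
    have hres : PySem.Dict.getD pvResult (2 : Int) "default" = "reasoning" := by decide
    rw [hres]
    simp_all [List.any_cons, List.any_nil, PySem.Str.isIn]
  by_cases hl : PySem.Str.isIn "llm" (PySem.Str.lower state_name) = true
  · have hb : pvPriority.foldl (pvStep (PySem.Str.lower state_name)) 9 = 3 :=
      le_antisymm
        (pv_fold_le (PySem.Str.lower state_name) pvPriority 9 "llm" 3 (by simp [pvPriority]) hl)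
      (pv_fold_ge (PySem.Str.lower state_name) pvPriority 9 3 (by norm_num) (by
        intro kp hmem hin
        fin_cases hmem <;> (try simp_all) <;> omega))
    rw [hb]
    have hres : PySem.Dict.getD pvResult (3 : Int) "default" = "llm_default" := by decide
    rw [hres]
    simp_all [List.any_cons, List.any_nil, PySem.Str.isIn]
  by_cases ha : PySem.Str.isIn "ai" (PySem.Str.lower state_name) = true
  · have hb : pvPriority.foldl (pvStep (PySem.Str.lower state_name)) 9 = 3 :=
      le_antisymm
        (pv_fold_le (PySem.Str.lower state_name) pvPriority 9 "ai" 3 (by simp [pvPriority]) ha)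
      (pv_fold_ge (PySem.Str.lower state_name) pvPriority 9 3 (by norm_num) (by
        intro kp hmem hin
        fin_cases hmem <;> (try simp_all) <;> omega))
    rw [hb]
    have hres : PySem.Dict.getD pvResult (3 : Int) "default" = "llm_default" := by decide
    rw [hres]
    simp_all [List.any_cons, List.any_nil, PySem.Str.isIn]
  by_cases he : PySem.Str.isIn "extract" (PySem.Str.lower state_name) = true
  · have hb : pvPriority.foldl (pvStep (PySem.Str.lower state_name)) 9 = 4 :=
      le_antisymm
        (pv_fold_le (PySem.Str.lower state_name) pvPriority 9 "extract" 4 (by simp [pvPriority]) he)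
      (pv_fold_ge (PySem.Str.lower state_name) pvPriority 9 4 (by norm_num) (by
        intro kp hmem hin
        fin_cases hmem <;> (try simp_all) <;> omega))
    rw [hb]
    have hres : PySem.Dict.getD pvResult (4 : Int) "default" = "extraction" := by decide
    rw [hres]
    simp_all [List.any_cons, List.any_nil, PySem.Str.isIn]
  by_cases hp : PySem.Str.isIn "parse" (PySem.Str.lower state_name) = true
  · have hb : pvPriority.foldl (pvStep (PySem.Str.lower state_name)) 9 = 4 :=
      le_antisymm
        (pv_fold_le (PySem.Str.lower state_name) pvPriority 9 "parse" 4 (by simp [pvPriority]) hp)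
      (pv_fold_ge (PySem.Str.lower state_name) pvPriority 9 4 (by norm_num) (by
        intro kp hmem hin
        fin_cases hmem <;> (try simp_all) <;> omega))
    rw [hb]
    have hres : PySem.Dict.getD pvResult (4 : Int) "default" = "extraction" := by decide
    rw [hres]
    simp_all [List.any_cons, List.any_nil, PySem.Str.isIn]
  by_cases ht : PySem.Str.isIn "transform" (PySem.Str.lower state_name) = true
  · have hb : pvPriority.foldl (pvStep (PySem.Str.lower state_name)) 9 = 5 :=
      le_antisymm
        (pv_fold_le (PySem.Str.lower state_name) pvPriority 9 "transform" 5 (by simp [pvPriority]) ht)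
      (pv_fold_ge (PySem.Str.lower state_name) pvPriority 9 5 (by norm_num) (by
        intro kp hmem hin
        fin_cases hmem <;> (try simp_all) <;> omega))
    rw [hb]
    have hres : PySem.Dict.getD pvResult (5 : Int) "default" = "transformation" := by decide
    rw [hres]
    simp_all [List.any_cons, List.any_nil, PySem.Str.isIn]
  by_cases hco : PySem.Str.isIn "convert" (PySem.Str.lower state_name) = true
  · have hb : pvPriority.foldl (pvStep (PySem.Str.lower state_name)) 9 = 5 :=
      le_antisymm
        (pv_fold_le (PySem.Str.lower state_name) pvPriority 9 "convert" 5 (by simp [pvPriority]) hco)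
      (pv_fold_ge (PySem.Str.lower state_name) pvPriority 9 5 (by norm_num) (by
        intro kp hmem hin
        fin_cases hmem <;> (try simp_all) <;> omega))
    rw [hb]
    have hres : PySem.Dict.getD pvResult (5 : Int) "default" = "transformation" := by decide
    rw [hres]
    simp_all [List.any_cons, List.any_nil, PySem.Str.isIn]
  by_cases hv : PySem.Str.isIn "validate" (PySem.Str.lower state_name) = true
  · have hb : pvPriority.foldl (pvStep (PySem.Str.lower state_name)) 9 = 6 :=
      le_antisymm
        (pv_fold_le (PySem.Str.lower state_name) pvPriority 9 "validate" 6 (by simp [pvPriority]) hv)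
      (pv_fold_ge (PySem.Str.lower state_name) pvPriority 9 6 (by norm_num) (by
        intro kp hmem hin
        fin_cases hmem <;> (try simp_all) <;> omega))
    rw [hb]
    have hres : PySem.Dict.getD pvResult (6 : Int) "default" = "validation" := by decide
    rw [hres]
    simp_all [List.any_cons, List.any_nil, PySem.Str.isIn]
  by_cases hch : PySem.Str.isIn "check" (PySem.Str.lower state_name) = true
  · have hb : pvPriority.foldl (pvStep (PySem.Str.lower state_name)) 9 = 6 :=
      le_antisymm
        (pv_fold_le (PySem.Str.lower state_name) pvPriority 9 "check" 6 (by simp [pvPriority]) hch)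
      (pv_fold_ge (PySem.Str.lower state_name) pvPriority 9 6 (by norm_num) (by
        intro kp hmem hin
        fin_cases hmem <;> (try simp_all) <;> omega))
    rw [hb]
    have hres : PySem.Dict.getD pvResult (6 : Int) "default" = "validation" := by decide
    rw [hres]
    simp_all [List.any_cons, List.any_nil, PySem.Str.isIn]
  by_cases hvf : PySem.Str.isIn "verify" (PySem.Str.lower state_name) = true
  · have hb : pvPriority.foldl (pvStep (PySem.Str.lower state_name)) 9 = 6 :=
      le_antisymm
        (pv_fold_le (PySem.Str.lower state_name) pvPriority 9 "verify" 6 (by simp [pvPriority]) hvf)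
      (pv_fold_ge (PySem.Str.lower state_name) pvPriority 9 6 (by norm_num) (by
        intro kp hmem hin
        fin_cases hmem <;> (try simp_all) <;> omega))
    rw [hb]
    have hres : PySem.Dict.getD pvResult (6 : Int) "default" = "validation" := by decide
    rw [hres]
    simp_all [List.any_cons, List.any_nil, PySem.Str.isIn]
  by_cases hapi : PySem.Str.isIn "api" (PySem.Str.lower state_name) = true
  · have hb : pvPriority.foldl (pvStep (PySem.Str.lower state_name)) 9 = 7 :=
      le_antisymm
        (pv_fold_le (PySem.Str.lower state_name) pvPriority 9 "api" 7 (by simp [pvPriority]) hapi)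
      (pv_fold_ge (PySem.Str.lower state_name) pvPriority 9 7 (by norm_num) (by
        intro kp hmem hin
        fin_cases hmem <;> (try simp_all) <;> omega))
    rw [hb]
    have hres : PySem.Dict.getD pvResult (7 : Int) "default" = "api_call" := by decide
    rw [hres]
    simp_all [List.any_cons, List.any_nil, PySem.Str.isIn]
  by_cases hh : PySem.Str.isIn "http" (PySem.Str.lower state_name) = true
  · have hb : pvPriority.foldl (pvStep (PySem.Str.lower state_name)) 9 = 7 :=
      le_antisymm
        (pv_fold_le (PySem.Str.lower state_name) pvPriority 9 "http" 7 (by simp [pvPriority]) hh)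
      (pv_fold_ge (PySem.Str.lower state_name) pvPriority 9 7 (by norm_num) (by
        intro kp hmem hin
        fin_cases hmem <;> (try simp_all) <;> omega))
    rw [hb]
    have hres : PySem.Dict.getD pvResult (7 : Int) "default" = "api_call" := by decide
    rw [hres]
    simp_all [List.any_cons, List.any_nil, PySem.Str.isIn]
  by_cases hrq : PySem.Str.isIn "request" (PySem.Str.lower state_name) = true
  · have hb : pvPriority.foldl (pvStep (PySem.Str.lower state_name)) 9 = 7 :=
      le_antisymm
        (pv_fold_le (PySem.Str.lower state_name) pvPriority 9 "request" 7 (by simp [pvPriority]) hrq)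
      (pv_fold_ge (PySem.Str.lower state_name) pvPriority 9 7 (by norm_num) (by
        intro kp hmem hin
        fin_cases hmem <;> (try simp_all) <;> omega))
    rw [hb]
    have hres : PySem.Dict.getD pvResult (7 : Int) "default" = "api_call" := by decide
    rw [hres]
    simp_all [List.any_cons, List.any_nil, PySem.Str.isIn]
  by_cases hcl : PySem.Str.isIn "call" (PySem.Str.lower state_name) = true
  · have hb : pvPriority.foldl (pvStep (PySem.Str.lower state_name)) 9 = 7 :=
      le_antisymm
        (pv_fold_le (PySem.Str.lower state_name) pvPriority 9 "call" 7 (by simp [pvPriority]) hcl)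
      (pv_fold_ge (PySem.Str.lower state_name) pvPriority 9 7 (by norm_num) (by
        intro kp hmem hin
        fin_cases hmem <;> (try simp_all) <;> omega))
    rw [hb]
    have hres : PySem.Dict.getD pvResult (7 : Int) "default" = "api_call" := by decide
    rw [hres]
    simp_all [List.any_cons, List.any_nil, PySem.Str.isIn]
  by_cases hdb : PySem.Str.isIn "db" (PySem.Str.lower state_name) = true
  · have hb : pvPriority.foldl (pvStep (PySem.Str.lower state_name)) 9 = 8 :=
      le_antisymm
        (pv_fold_le (PySem.Str.lower state_name) pvPriority 9 "db" 8 (by simp [pvPriority]) hdb)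
      (pv_fold_ge (PySem.Str.lower state_name) pvPriority 9 8 (by norm_num) (by
        intro kp hmem hin
        fin_cases hmem <;> (try simp_all) <;> omega))
    rw [hb]
    have hres : PySem.Dict.getD pvResult (8 : Int) "default" = "database" := by decide
    rw [hres]
    simp_all [List.any_cons, List.any_nil, PySem.Str.isIn]
  by_cases hdy : PySem.Str.isIn "dynamo" (PySem.Str.lower state_name) = true
  · have hb : pvPriority.foldl (pvStep (PySem.Str.lower state_name)) 9 = 8 :=
      le_antisymm
        (pv_fold_le (PySem.Str.lower state_name) pvPriority 9 "dynamo" 8 (by simp [pvPriority]) hdy)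
      (pv_fold_ge (PySem.Str.lower state_name) pvPriority 9 8 (by norm_num) (by
        intro kp hmem hin
        fin_cases hmem <;> (try simp_all) <;> omega))
    rw [hb]
    have hres : PySem.Dict.getD pvResult (8 : Int) "default" = "database" := by decide
    rw [hres]
    simp_all [List.any_cons, List.any_nil, PySem.Str.isIn]
  by_cases hda : PySem.Str.isIn "database" (PySem.Str.lower state_name) = true
  · have hb : pvPriority.foldl (pvStep (PySem.Str.lower state_name)) 9 = 8 :=
      le_antisymm
        (pv_fold_le (PySem.Str.lower state_name) pvPriority 9 "database" 8 (by simp [pvPriority]) hda)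
      (pv_fold_ge (PySem.Str.lower state_name) pvPriority 9 8 (by norm_num) (by
        intro kp hmem hin
        fin_cases hmem <;> (try simp_all) <;> omega))
    rw [hb]
    have hres : PySem.Dict.getD pvResult (8 : Int) "default" = "database" := by decide
    rw [hres]
    simp_all [List.any_cons, List.any_nil, PySem.Str.isIn]
  by_cases hq : PySem.Str.isIn "query" (PySem.Str.lower state_name) = true
  · have hb : pvPriority.foldl (pvStep (PySem.Str.lower state_name)) 9 = 8 :=
      le_antisymm
        (pv_fold_le (PySem.Str.lower state_name) pvPriority 9 "query" 8 (by simp [pvPriority]) hq)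
      (pv_fold_ge (PySem.Str.lower state_name) pvPriority 9 8 (by norm_num) (by
        intro kp hmem hin
        fin_cases hmem <;> (try simp_all) <;> omega))
    rw [hb]
    have hres : PySem.Dict.getD pvResult (8 : Int) "default" = "database" := by decide
    rw [hres]
    simp_all [List.any_cons, List.any_nil, PySem.Str.isIn]
  have hb : pvPriority.foldl (pvStep (PySem.Str.lower state_name)) 9 = 9 :=
    le_antisymm (pv_fold_le_init (PySem.Str.lower state_name) pvPriority 9)
      (pv_fold_ge (PySem.Str.lower state_name) pvPriority 9 9 (le_refl _) (by
        intro kp hmem hin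
        fin_cases hmem <;> simp_all))
  rw [hb]
  have hres : PySem.Dict.getD pvResult (9 : Int) "default" = "default" := by decide
  rw [hres]
  simp_all [List.any_cons, List.any_nil, PySem.Str.isIn]
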